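-- pv_equiv track=rewrite | github.com/lpwgroup/respyte | respyte/legacy/molecule_resp.py | getidxof1statm
-- ===== SOURCE A (Python) =====
-- def getidxof1statm(listofresid, listofresname):
--     idxof1statm = [0]
--     resnameof1statm = [listofresname[0]]
--     check = [listofresid[0]]
--     for idx, resid in enumerate(listofresid):
--         if resid == check[-1]:
--             pass
--         else:
--             check.append(resid)
--             idxof1statm.append(idx)
--             resnameof1statm.append(listofresname[idx])
--     return idxof1statm, resnameof1statm
-- ===== SOURCE B (Python) =====
-- def getidxof1statm(listofresid, listofresname):
--     n = len(listofresid)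
--     idxof1statm = []
--     resnameof1statm = []
--     pos = 0
--     while pos < n:
--         idxof1statm.append(pos)
--         resnameof1statm.append(listofresname[pos])
--         v = listofresid[pos]
--         pos += 1
--         while pos < n and listofresid[pos] == v:
--             pos += 1
--     return idxof1statm, resnameof1statm
-- ===== Notes on version B (the rewrite author's own statement) =====
-- stated objective: alternative
-- what changed: Replaces A's single element-wise pass that compares each element against a maintained check stack by a nested run-skipping cursor: the outer loop records each run's start index and name, the inner loop advances the cursor past the rest of the run; no check list exists.
import Mathlib
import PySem

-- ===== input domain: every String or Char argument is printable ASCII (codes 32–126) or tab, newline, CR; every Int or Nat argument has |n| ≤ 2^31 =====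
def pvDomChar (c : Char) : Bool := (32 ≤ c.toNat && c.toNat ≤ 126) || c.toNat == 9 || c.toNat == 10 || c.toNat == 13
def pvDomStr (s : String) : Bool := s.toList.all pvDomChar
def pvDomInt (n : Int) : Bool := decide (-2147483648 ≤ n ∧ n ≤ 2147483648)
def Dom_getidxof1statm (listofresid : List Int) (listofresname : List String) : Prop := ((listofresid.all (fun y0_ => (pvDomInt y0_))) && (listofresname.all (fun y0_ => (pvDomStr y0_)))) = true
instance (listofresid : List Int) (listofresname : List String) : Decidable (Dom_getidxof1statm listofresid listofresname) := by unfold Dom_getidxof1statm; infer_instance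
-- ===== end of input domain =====

-- B replaces A's fused element-wise loop with a check stack by a nested run-skipping cursor
-- (outer loop per run, inner loop skipping the run) — objective: alternative decomposition.
-- Same return value on Pre_; no argument is mutated.

-- ===== PORT A =====
-- loop body of A's single for-loop; the pyGetD defaults (0 / "") are only reached outside
-- Pre_getidxof1statm, where the Python raises IndexError
def pvStepA (listofresname : List String) (s : List Int × List String × List Int)
    (p : Int × Int) : List Int × List String × List Int :=
  if p.2 == PySem.List.pyGetD s.2.2 (-1) 0 then s
  else (s.1 ++ [p.1], s.2.1 ++ [PySem.List.pyGetD listofresname p.1 ""], s.2.2 ++ [p.2])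

def getidxof1statm (listofresid : List Int) (listofresname : List String) : List Int × List String :=
  let init : List Int × List String × List Int :=
    ([0], [PySem.List.pyGetD listofresname 0 ""], [PySem.List.pyGetD listofresid 0 0])
  let s := (PySem.List.enumerate listofresid 0).foldl (pvStepA listofresname) init
  (s.1, s.2.1)

-- ===== PORT B =====
-- inner 'while pos < n and listofresid[pos] == v: pos += 1' of Source B
def pvSkip (l : List Int) (v : Int) (pos : Nat) : Nat :=
  if _h : pos < l.length then
    if l.getD pos 0 = v then pvSkip l v (pos + 1) else pos
  else pos
termination_by l.length - pos

-- needed by pvOuterB's termination proof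
lemma pvSkip_ge (l : List Int) (v : Int) (pos : Nat) : pos ≤ pvSkip l v pos := by
  unfold pvSkip
  split
  · split
    · have := pvSkip_ge l v (pos + 1); omega
    · exact le_rfl
  · exact le_rfl
termination_by l.length - pos

-- outer 'while pos < n' of Source B, carrying the two accumulators
def pvOuterB (resid : List Int) (resname : List String)
    (acc : List Int × List String) (pos : Nat) : List Int × List String :=
  if _h : pos < resid.length then
    pvOuterB resid resname
      (acc.1 ++ [(pos : Int)], acc.2 ++ [PySem.List.pyGetD resname (pos : Int) ""])
      (pvSkip resid (resid.getD pos 0) (pos + 1))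
  else acc
termination_by resid.length - pos
decreasing_by
  have := pvSkip_ge resid (resid.getD pos 0) (pos + 1); omega

def getidxof1statm_alt (listofresid : List Int) (listofresname : List String) : List Int × List String :=
  pvOuterB listofresid listofresname ([], []) 0

-- ===== PRECONDITION & SPEC =====
-- exactly the inputs on which the Python A returns: both lists nonempty, and every run-boundary
-- index (where the resid differs from its predecessor) is a valid index into listofresname
def Pre_getidxof1statm (listofresid : List Int) (listofresname : List String) : Prop :=
  listofresid ≠ [] ∧ listofresname ≠ [] ∧
  ∀ i ∈ List.range listofresid.length,
    1 ≤ i → listofresid.getD i 0 ≠ listofresid.getD (i - 1) 0 → i < listofresname.length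

instance (listofresid : List Int) (listofresname : List String) :
    Decidable (Pre_getidxof1statm listofresid listofresname) := by
  unfold Pre_getidxof1statm; infer_instance

def pvWitness_getidxof1statm : List Int × List String := ([1, 1, 2], ["ALA", "ALA", "GLY"])

def Spec_getidxof1statm (listofresid : List Int) (listofresname : List String) (out : List Int × List String) : Prop := out = getidxof1statm_alt listofresid listofresname
instance (listofresid : List Int) (listofresname : List String) (out : List Int × List String) : Decidable (Spec_getidxof1statm listofresid listofresname out) := by unfold Spec_getidxof1statm; infer_instance

-- ===== CLAIM (what is proved, stated in full; the proofs are below) =====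
def Claim_equal_getidxof1statm : Prop := ∀ (listofresid : List Int) (listofresname : List String), Dom_getidxof1statm listofresid listofresname → Pre_getidxof1statm listofresid listofresname → Spec_getidxof1statm listofresid listofresname (getidxof1statm listofresid listofresname)

-- ===== LEMMAS AND PROOFS =====

-- the boundary indices of the run l, whose elements carry indices s, s+1, …, with p the value
-- just before l
def pvBIdx : List Int → Int → Int → List Int
  | [], _, _ => []
  | x :: t, s, p => if x = p then pvBIdx t (s + 1) x else s :: pvBIdx t (s + 1) x

lemma pvLoopA (listofresname : List String) (l : List Int) (s p : Int) (idxs : List Int)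
    (names : List String) (check : List Int) (h : PySem.List.pyGetD check (-1) 0 = p) :
    ∃ check', (PySem.List.enumerate l s).foldl (pvStepA listofresname) (idxs, names, check)
      = (idxs ++ pvBIdx l s p,
         names ++ (pvBIdx l s p).map (fun i => PySem.List.pyGetD listofresname i ""),
         check') := by
  induction l generalizing s p idxs names check with
  | nil => exact ⟨check, by simp [PySem.List.enumerate_nil, pvBIdx]⟩
  | cons x t ih =>
    rw [PySem.List.enumerate_cons, List.foldl_cons]
    by_cases hx : x = p
    · have hstep : pvStepA listofresname (idxs, names, check) (s, x) = (idxs, names, check) := by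
        simp [pvStepA, h, hx]
      rw [hstep]
      subst hx
      obtain ⟨c', hc⟩ := ih (s + 1) x idxs names check h
      exact ⟨c', by simp [pvBIdx, hc]⟩
    · have hstep : pvStepA listofresname (idxs, names, check) (s, x)
          = (idxs ++ [s], names ++ [PySem.List.pyGetD listofresname s ""], check ++ [x]) := by
        simp [pvStepA, h, hx]
      rw [hstep]
      obtain ⟨c', hc⟩ := ih (s + 1) x (idxs ++ [s])
        (names ++ [PySem.List.pyGetD listofresname s ""]) (check ++ [x])
        (PySem.List.pyGetD_neg_one_append_singleton check x 0)
      exact ⟨c', by simp [pvBIdx, hx, hc]⟩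

lemma pvSkip_le (l : List Int) (v : Int) (pos : Nat) (h : pos ≤ l.length) :
    pvSkip l v pos ≤ l.length := by
  unfold pvSkip
  split
  · split
    · exact pvSkip_le l v (pos + 1) (by omega)
    · exact h
  · exact h
termination_by l.length - pos

lemma pvSkip_stop (l : List Int) (v : Int) (pos : Nat)
    (h : pvSkip l v pos < l.length) : l.getD (pvSkip l v pos) 0 ≠ v := by
  by_cases h1 : pos < l.length
  · by_cases h2 : l.getD pos 0 = v
    · rw [pvSkip, dif_pos h1, if_pos h2] at h ⊢
      exact pvSkip_stop l v (pos + 1) h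
    · rw [pvSkip, dif_pos h1, if_neg h2]
      exact h2
  · rw [pvSkip, dif_neg h1] at h
    omega
termination_by l.length - pos

-- skipping the run does not change the remaining boundary list
lemma pvSkip_bidx (l : List Int) (v : Int) (pos : Nat) :
    pvBIdx (l.drop pos) (pos : Int) v
      = pvBIdx (l.drop (pvSkip l v pos)) ((pvSkip l v pos : Nat) : Int) v := by
  unfold pvSkip
  split
  · rename_i hlt
    split
    · rename_i hv
      have hd : l.drop pos = l[pos] :: l.drop (pos + 1) := List.drop_eq_getElem_cons hlt
      have hx : l[pos] = v := by rwa [List.getD_eq_getElem _ _ hlt] at hv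
      have hc : ((pos : Int) + 1) = ((pos + 1 : Nat) : Int) := by push_cast; ring
      rw [hd, pvBIdx, if_pos hx, hx, hc]
      exact pvSkip_bidx l v (pos + 1)
    · rfl
  · rfl
termination_by l.length - pos

-- the outer loop of B, characterised by pvBIdx; p is a value different from the element at pos
lemma pvOuterB_eq (resid : List Int) (resname : List String) :
    ∀ (k pos : Nat) (is : List Int) (ns : List String) (p : Int),
      resid.length - pos ≤ k → pos ≤ resid.length →
      (pos = resid.length ∨ resid.getD pos 0 ≠ p) →
      pvOuterB resid resname (is, ns) pos
        = (is ++ pvBIdx (resid.drop pos) (pos : Int) p,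
           ns ++ (pvBIdx (resid.drop pos) (pos : Int) p).map
             (fun i => PySem.List.pyGetD resname i "")) := by
  intro k
  induction k with
  | zero =>
    intro pos is ns p hk hle _
    have hpos : pos = resid.length := by omega
    rw [pvOuterB]
    simp [hpos, pvBIdx]
  | succ k ih =>
    intro pos is ns p hk hle hp
    rw [pvOuterB]
    split
    · rename_i hlt
      have hx : resid.getD pos 0 ≠ p := by
        rcases hp with h | h
        · omega
        · exact h
      have hd : resid.drop pos = resid[pos] :: resid.drop (pos + 1) :=
        List.drop_eq_getElem_cons hlt
      have hget : resid.getD pos 0 = resid[pos] := List.getD_eq_getElem _ _ hlt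
      set x := resid.getD pos 0 with hxdef
      set pos' := pvSkip resid x (pos + 1) with hpos'
      have h1 : pos + 1 ≤ pos' := pvSkip_ge resid x (pos + 1)
      have h2 : pos' ≤ resid.length := pvSkip_le resid x (pos + 1) (by omega)
      have h3 : pos' = resid.length ∨ resid.getD pos' 0 ≠ x := by
        by_cases h : pos' < resid.length
        · exact Or.inr (pvSkip_stop resid x (pos + 1) h)
        · exact Or.inl (by omega)
      have hIH := ih pos' (is ++ [(pos : Int)])
        (ns ++ [PySem.List.pyGetD resname (pos : Int) ""]) x (by omega) h2 h3
      rw [hIH]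
      have hsb := pvSkip_bidx resid x (pos + 1)
      have hc : ((pos : Int) + 1) = ((pos + 1 : Nat) : Int) := by push_cast; ring
      rw [hd, pvBIdx, if_neg (by rw [← hget]; exact hx), ← hget, hc, hsb]
      simp [← hpos']
    · rename_i hge
      have hpos : pos = resid.length := by omega
      simp [hpos, pvBIdx]

-- ===== VERDICT (by name: the statement is the Claim_ definition above) =====
theorem getidxof1statm_spec : Claim_equal_getidxof1statm := by
  intro listofresid listofresname _ hpre
  obtain ⟨hne, -, -⟩ := hpre
  obtain ⟨r0, rest, rfl⟩ := List.exists_cons_of_ne_nil hne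
  simp only [Spec_getidxof1statm, getidxof1statm, getidxof1statm_alt]
  -- A side
  rw [PySem.List.enumerate_cons, List.foldl_cons]
  simp only [zero_add]
  have hsingle : PySem.List.pyGetD [r0] (-1) 0 = r0 := by
    simpa using PySem.List.pyGetD_neg_one_append_singleton ([] : List Int) r0 0
  have hstep : pvStepA listofresname
      ([0], [PySem.List.pyGetD listofresname 0 ""], [PySem.List.pyGetD (r0 :: rest) 0 0]) (0, r0)
      = ([0], [PySem.List.pyGetD listofresname 0 ""], [r0]) := by
    simp [pvStepA, PySem.List.pyGetD_zero_cons, hsingle]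
  obtain ⟨c', hc⟩ := pvLoopA listofresname rest 1 r0 [0]
    [PySem.List.pyGetD listofresname 0 ""] [r0] hsingle
  -- B side: start the outer loop with fictitious previous value r0 + 1 ≠ r0
  have hB := pvOuterB_eq (r0 :: rest) listofresname ((r0 :: rest).length) 0 [] [] (r0 + 1)
    (by omega) (by omega) (Or.inr (by simp))
  have hbidx : pvBIdx ((r0 :: rest).drop 0) ((0 : Nat) : Int) (r0 + 1)
      = 0 :: pvBIdx rest 1 r0 := by
    simp [pvBIdx]
  rw [hbidx] at hB
  rw [hstep, hc, hB]
  simp
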